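-- pv_equiv track=rewrite | github.com/nikita-borisov/QAOA_Hadamard_Finder | Hadamatrix_Finder.py | hadamard_obj
-- ===== SOURCE A (Python) =====
-- def hadamard_obj(x, n):
--     obj = 0
--     for i in range(n):
--         for j in range(n):
--             if i!=j:
--                 temp=0
--                 for k in range(n):
--                     temp+=(2*int(x[n*i+k])-1)*(2*int(x[n*j+k])-1)
--                 obj+=temp**2
--     return obj
-- ===== SOURCE B (Python) =====
-- def hadamard_obj(x, n):
--     rows = [[2 * int(x[n * i + k]) - 1 for k in range(n)] for i in range(n)]
--     gram = [[sum(r[k] * r[l] for r in rows) for l in range(n)] for k in range(n)]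
--     total = sum(g * g for grow in gram for g in grow)
--     diag = sum(sum(e * e for e in r) ** 2 for r in rows)
--     return total - diag
-- ===== Notes on version B (the rewrite author's own statement) =====
-- stated objective: alternative
-- what changed: Instead of looping over all ordered row pairs and recomputing row dot-products, B converts x to +/-1 rows once, forms the n x n column Gram matrix, sums all its squared entries and subtracts the squared row self-dot-products (sum_{i!=j} d_ij^2 = sum_{k,l} G_kl^2 - sum_i d_ii^2).
-- outside the precondition, e.g. on hadamard_obj([], 1): A returns 0, B raises IndexError
import Mathlib
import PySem

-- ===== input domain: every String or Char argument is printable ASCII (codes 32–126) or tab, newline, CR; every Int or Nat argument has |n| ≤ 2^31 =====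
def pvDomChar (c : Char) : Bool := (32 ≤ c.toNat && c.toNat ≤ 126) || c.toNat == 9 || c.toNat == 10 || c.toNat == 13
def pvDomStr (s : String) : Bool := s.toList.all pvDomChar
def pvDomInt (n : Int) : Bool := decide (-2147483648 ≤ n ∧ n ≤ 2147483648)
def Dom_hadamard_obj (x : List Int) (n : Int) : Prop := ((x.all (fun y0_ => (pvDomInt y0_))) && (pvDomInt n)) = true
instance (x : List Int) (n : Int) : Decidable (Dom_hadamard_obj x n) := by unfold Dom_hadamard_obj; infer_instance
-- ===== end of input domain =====

-- B replaces the ordered-row-pair dot-product loop by the column Gram matrix: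
-- sum_{i≠j} d_ij^2 = sum_{k,l} G_kl^2 - sum_i d_ii^2 (alternative decomposition, same cost).


-- ===== PORT A =====
def hadamard_obj (x : List Int) (n : Int) : Int :=
  (PySem.List.pyRange 0 n 1).foldl (fun obj i =>
    (PySem.List.pyRange 0 n 1).foldl (fun obj j =>
      if i ≠ j then
        obj + ((PySem.List.pyRange 0 n 1).foldl (fun temp k =>
          temp + (2 * PySem.List.pyGetD x (n*i+k) 0 - 1) * (2 * PySem.List.pyGetD x (n*j+k) 0 - 1)) 0) ^ 2
      else obj) obj) 0

-- ===== PORT B =====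
def hadamard_obj_alt (x : List Int) (n : Int) : Int :=
  let rows := (PySem.List.pyRange 0 n 1).map (fun i =>
      (PySem.List.pyRange 0 n 1).map (fun k => 2 * PySem.List.pyGetD x (n*i+k) 0 - 1))
  let gram := (PySem.List.pyRange 0 n 1).map (fun k =>
      (PySem.List.pyRange 0 n 1).map (fun l =>
        (rows.map (fun r => PySem.List.pyGetD r k 0 * PySem.List.pyGetD r l 0)).sum))
  let total := (gram.map (fun grow => (grow.map (fun g => g * g)).sum)).sum
  let diag := (rows.map (fun r => ((r.map (fun e => e * e)).sum) ^ 2)).sum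
  total - diag

-- ===== PRECONDITION & SPEC =====
-- Pre_ excludes inputs on which A raises IndexError (fewer than n*n entries with n ≥ 2);
-- it also excludes n = 1 with x empty/short, where A reads nothing and returns 0 but B
-- converts the single row and itself raises IndexError.
def Pre_hadamard_obj (x : List Int) (n : Int) : Prop := n ≤ 0 ∨ n * n ≤ (x.length : Int)
instance (x : List Int) (n : Int) : Decidable (Pre_hadamard_obj x n) := by unfold Pre_hadamard_obj; infer_instance
def pvWitness_hadamard_obj : List Int × Int := ([1, 0, 0, 1], 2)
def Spec_hadamard_obj (x : List Int) (n : Int) (out : Int) : Prop := out = hadamard_obj_alt x n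
instance (x : List Int) (n : Int) (out : Int) : Decidable (Spec_hadamard_obj x n out) := by unfold Spec_hadamard_obj; infer_instance

-- ===== CLAIM (what is proved, stated in full; the proofs are below) =====
def Claim_equal_hadamard_obj : Prop := ∀ (x : List Int) (n : Int), Dom_hadamard_obj x n → Pre_hadamard_obj x n → Spec_hadamard_obj x n (hadamard_obj x n)

-- ===== LEMMAS AND PROOFS =====

-- the ±1 entry used by both programs
def pvV (x : List Int) (n i k : Int) : Int := 2 * PySem.List.pyGetD x (n * i + k) 0 - 1

theorem pv_sum_map_range (f : ℕ → Int) (N : ℕ) :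
    ((List.range N).map f).sum = ∑ i ∈ Finset.range N, f i := by
  induction N with
  | zero => simp
  | succ m ih => rw [List.range_succ, Finset.sum_range_succ, List.map_append, List.sum_append, ih]; simp

theorem pv_pyRange_map_sum (f : Int → Int) (n : Int) :
    ((PySem.List.pyRange 0 n 1).map f).sum = ∑ i ∈ Finset.range n.toNat, f i := by
  rw [PySem.List.pyRange_one, List.map_map, pv_sum_map_range]
  simp

-- A as a double Finset sum
theorem pv_A_eq (x : List Int) (n : Int) :
    hadamard_obj x n =
      ∑ i ∈ Finset.range n.toNat, ∑ j ∈ Finset.range n.toNat,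
        if (i : Int) ≠ (j : Int) then (∑ k ∈ Finset.range n.toNat, pvV x n i k * pvV x n j k) ^ 2 else 0 := by
  unfold hadamard_obj
  have hinner : ∀ (i j : Int),
      ((PySem.List.pyRange 0 n 1).foldl (fun temp k =>
        temp + (2 * PySem.List.pyGetD x (n*i+k) 0 - 1) * (2 * PySem.List.pyGetD x (n*j+k) 0 - 1)) 0)
      = ∑ k ∈ Finset.range n.toNat, pvV x n i k * pvV x n j k := by
    intro i j
    rw [PySem.List.foldl_add (g := fun k => (2 * PySem.List.pyGetD x (n*i+k) 0 - 1) * (2 * PySem.List.pyGetD x (n*j+k) 0 - 1))]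
    rw [pv_pyRange_map_sum]
    simp [pvV]
  have hmid : ∀ (i : Int) (obj : Int),
      ((PySem.List.pyRange 0 n 1).foldl (fun obj j =>
        if i ≠ j then
          obj + ((PySem.List.pyRange 0 n 1).foldl (fun temp k =>
            temp + (2 * PySem.List.pyGetD x (n*i+k) 0 - 1) * (2 * PySem.List.pyGetD x (n*j+k) 0 - 1)) 0) ^ 2
        else obj) obj)
      = obj + ∑ j ∈ Finset.range n.toNat,
          (if i ≠ (j : Int) then (∑ k ∈ Finset.range n.toNat, pvV x n i k * pvV x n j k) ^ 2 else 0) := by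
    intro i obj
    have h1 : ((PySem.List.pyRange 0 n 1).foldl (fun obj j =>
        if i ≠ j then
          obj + ((PySem.List.pyRange 0 n 1).foldl (fun temp k =>
            temp + (2 * PySem.List.pyGetD x (n*i+k) 0 - 1) * (2 * PySem.List.pyGetD x (n*j+k) 0 - 1)) 0) ^ 2
        else obj) obj)
        = ((PySem.List.pyRange 0 n 1).foldl (fun obj j =>
            obj + (if i ≠ j then (∑ k ∈ Finset.range n.toNat, pvV x n i k * pvV x n j k) ^ 2 else 0)) obj) := by
      apply PySem.List.foldl_congr_mem
      intro acc j _
      rw [hinner i j]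
      by_cases h : i = j <;> simp [h]
    rw [h1, PySem.List.foldl_add (g := fun j => if i ≠ j then (∑ k ∈ Finset.range n.toNat, pvV x n i k * pvV x n j k) ^ 2 else 0)]
    rw [pv_pyRange_map_sum]
  have h2 : ((PySem.List.pyRange 0 n 1).foldl (fun obj i =>
      (PySem.List.pyRange 0 n 1).foldl (fun obj j =>
        if i ≠ j then
          obj + ((PySem.List.pyRange 0 n 1).foldl (fun temp k =>
            temp + (2 * PySem.List.pyGetD x (n*i+k) 0 - 1) * (2 * PySem.List.pyGetD x (n*j+k) 0 - 1)) 0) ^ 2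
        else obj) obj) 0)
      = ((PySem.List.pyRange 0 n 1).foldl (fun obj i =>
          obj + ∑ j ∈ Finset.range n.toNat,
            (if i ≠ (j : Int) then (∑ k ∈ Finset.range n.toNat, pvV x n i k * pvV x n j k) ^ 2 else 0)) 0) := by
    apply PySem.List.foldl_congr_mem
    intro acc i _
    exact hmid i acc
  rw [h2, PySem.List.foldl_add (g := fun i => ∑ j ∈ Finset.range n.toNat,
      (if i ≠ (j : Int) then (∑ k ∈ Finset.range n.toNat, pvV x n i k * pvV x n j k) ^ 2 else 0))]
  rw [pv_pyRange_map_sum]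
  ring

-- B as Finset sums
theorem pv_B_eq (x : List Int) (n : Int) (hn : 0 ≤ n) :
    hadamard_obj_alt x n =
      (∑ k ∈ Finset.range n.toNat, ∑ l ∈ Finset.range n.toNat,
        (∑ i ∈ Finset.range n.toNat, pvV x n i k * pvV x n i l) ^ 2)
      - ∑ i ∈ Finset.range n.toNat, (∑ k ∈ Finset.range n.toNat, pvV x n i k * pvV x n i k) ^ 2 := by
  have hrow : ∀ (i kk : Int), 0 ≤ kk → kk < n →
      PySem.List.pyGetD ((PySem.List.pyRange 0 n 1).map (fun k => 2 * PySem.List.pyGetD x (n*i+k) 0 - 1)) kk 0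
        = pvV x n i kk := by
    intro i kk h1 h2
    rw [PySem.List.pyGetD_map_pyRange_of_nonneg _ _ _ _ h1 h2]; rfl
  have hcast : ∀ k : ℕ, k ∈ Finset.range n.toNat → (0 : Int) ≤ (k : Int) ∧ (k : Int) < n := by
    intro k hk
    simp only [Finset.mem_range] at hk
    omega
  unfold hadamard_obj_alt
  simp only [List.map_map, Function.comp_def, pv_pyRange_map_sum]
  congr 1
  · apply Finset.sum_congr rfl
    intro k hk
    apply Finset.sum_congr rfl
    intro l hl
    rw [pow_two]
    congr 1 <;>
    · apply Finset.sum_congr rfl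
      intro i _
      rw [hrow i k (hcast k hk).1 (hcast k hk).2, hrow i l (hcast l hl).1 (hcast l hl).2]

-- the algebraic identity
theorem pv_identity (N : ℕ) (w : ℕ → ℕ → Int) :
    (∑ i ∈ Finset.range N, ∑ j ∈ Finset.range N,
      if (i : Int) ≠ (j : Int) then (∑ k ∈ Finset.range N, w i k * w j k) ^ 2 else 0)
    = (∑ k ∈ Finset.range N, ∑ l ∈ Finset.range N,
        (∑ i ∈ Finset.range N, w i k * w i l) ^ 2)
      - ∑ i ∈ Finset.range N, (∑ k ∈ Finset.range N, w i k * w i k) ^ 2 := by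
  have hsplit : (∑ i ∈ Finset.range N, ∑ j ∈ Finset.range N,
      if (i : Int) ≠ (j : Int) then (∑ k ∈ Finset.range N, w i k * w j k) ^ 2 else 0)
      = (∑ i ∈ Finset.range N, ∑ j ∈ Finset.range N, (∑ k ∈ Finset.range N, w i k * w j k) ^ 2)
        - ∑ i ∈ Finset.range N, (∑ k ∈ Finset.range N, w i k * w i k) ^ 2 := by
    rw [← Finset.sum_sub_distrib]
    apply Finset.sum_congr rfl
    intro i hi
    have h1 : ∀ j : ℕ,
        (if (i : Int) ≠ (j : Int) then (∑ k ∈ Finset.range N, w i k * w j k) ^ 2 else 0)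
        = (∑ k ∈ Finset.range N, w i k * w j k) ^ 2
          - (if j = i then (∑ k ∈ Finset.range N, w i k * w j k) ^ 2 else 0) := by
      intro j
      by_cases h : j = i
      · subst h; simp
      · have : (i : Int) ≠ (j : Int) := by
          simp only [ne_eq, Nat.cast_inj]; omega
        simp [h, this]
    calc (∑ j ∈ Finset.range N,
            if (i : Int) ≠ (j : Int) then (∑ k ∈ Finset.range N, w i k * w j k) ^ 2 else 0)
        = ∑ j ∈ Finset.range N, ((∑ k ∈ Finset.range N, w i k * w j k) ^ 2
            - (if j = i then (∑ k ∈ Finset.range N, w i k * w j k) ^ 2 else 0)) := by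
          exact Finset.sum_congr rfl (fun j _ => h1 j)
      _ = (∑ j ∈ Finset.range N, (∑ k ∈ Finset.range N, w i k * w j k) ^ 2)
            - ∑ j ∈ Finset.range N, (if j = i then (∑ k ∈ Finset.range N, w i k * w j k) ^ 2 else 0) := by
          rw [Finset.sum_sub_distrib]
      _ = (∑ j ∈ Finset.range N, (∑ k ∈ Finset.range N, w i k * w j k) ^ 2)
            - (∑ k ∈ Finset.range N, w i k * w i k) ^ 2 := by
          rw [Finset.sum_ite_eq' (Finset.range N) i
            (fun j => (∑ k ∈ Finset.range N, w i k * w j k) ^ 2), if_pos hi]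
  rw [hsplit]
  congr 1
  calc (∑ i ∈ Finset.range N, ∑ j ∈ Finset.range N, (∑ k ∈ Finset.range N, w i k * w j k) ^ 2)
      = ∑ i ∈ Finset.range N, ∑ j ∈ Finset.range N, ∑ k ∈ Finset.range N, ∑ l ∈ Finset.range N,
          (w i k * w j k) * (w i l * w j l) := by
        apply Finset.sum_congr rfl; intro i _
        apply Finset.sum_congr rfl; intro j _
        rw [pow_two, Finset.sum_mul_sum]
    _ = ∑ i ∈ Finset.range N, ∑ k ∈ Finset.range N, ∑ j ∈ Finset.range N, ∑ l ∈ Finset.range N,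
          (w i k * w j k) * (w i l * w j l) := by
        exact Finset.sum_congr rfl (fun i _ => Finset.sum_comm)
    _ = ∑ k ∈ Finset.range N, ∑ i ∈ Finset.range N, ∑ j ∈ Finset.range N, ∑ l ∈ Finset.range N,
          (w i k * w j k) * (w i l * w j l) := Finset.sum_comm
    _ = ∑ k ∈ Finset.range N, ∑ i ∈ Finset.range N, ∑ l ∈ Finset.range N, ∑ j ∈ Finset.range N,
          (w i k * w j k) * (w i l * w j l) := by
        exact Finset.sum_congr rfl (fun k _ =>
          Finset.sum_congr rfl (fun i _ => Finset.sum_comm))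
    _ = ∑ k ∈ Finset.range N, ∑ l ∈ Finset.range N, ∑ i ∈ Finset.range N, ∑ j ∈ Finset.range N,
          (w i k * w j k) * (w i l * w j l) := by
        exact Finset.sum_congr rfl (fun k _ => Finset.sum_comm)
    _ = ∑ k ∈ Finset.range N, ∑ l ∈ Finset.range N, ∑ i ∈ Finset.range N, ∑ j ∈ Finset.range N,
          (w i k * w i l) * (w j k * w j l) := by
        apply Finset.sum_congr rfl; intro k _
        apply Finset.sum_congr rfl; intro l _
        apply Finset.sum_congr rfl; intro i _
        apply Finset.sum_congr rfl; intro j _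
        ring
    _ = ∑ k ∈ Finset.range N, ∑ l ∈ Finset.range N,
          (∑ i ∈ Finset.range N, w i k * w i l) ^ 2 := by
        apply Finset.sum_congr rfl; intro k _
        apply Finset.sum_congr rfl; intro l _
        rw [pow_two, Finset.sum_mul_sum]

-- ===== VERDICT (by name: the statement is the Claim_ definition above) =====
theorem hadamard_obj_spec : Claim_equal_hadamard_obj := by
  intro x n _ hpre
  unfold Spec_hadamard_obj
  by_cases hn : n ≤ 0
  · simp [hadamard_obj, hadamard_obj_alt, PySem.List.pyRange_one_eq_nil hn]
  · rw [pv_A_eq, pv_B_eq x n (by omega)]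
    exact pv_identity n.toNat (fun a b => pvV x n a b)
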